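-- pv_equiv track=rewrite | github.com/mkXultra/mew | src/mew/agent.py | append_missing_guardrail_decisions
-- ===== SOURCE A (Python) =====
-- REQUIRED_MODEL_GUARDRAIL_DECISIONS = {
--     "collect_agent_result",
--     "review_agent_run",
--     "followup_review",
--     "run_verification",
--     "propose_task",
--     "refine_task",
--     "plan_task",
--     "start_work_session",
--     "dispatch_task",
-- }
--
-- def required_model_guardrail_decision(decision):
--     decision_type = decision.get("type")
--     if decision_type in REQUIRED_MODEL_GUARDRAIL_DECISIONS:
--         return True
--     return decision_type == "self_review" and bool(decision.get("proposed_task_title"))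
--
-- def decision_matches(candidate, existing):
--     if candidate.get("type") != existing.get("type"):
--         return False
--     target_keys = ("task_id", "run_id", "plan_id")
--     compared = False
--     for key in target_keys:
--         if candidate.get(key) is None and existing.get(key) is None:
--             continue
--         compared = True
--         if candidate.get(key) != existing.get(key):
--             return False
--     return compared or candidate.get("type") == existing.get("type")
--
-- def append_missing_guardrail_decisions(plan, fallback):
--     decisions = plan.setdefault("decisions", [])
--     for candidate in fallback.get("decisions", []):
--         if not required_model_guardrail_decision(candidate):
--             continue
--         if any(decision_matches(candidate, existing) for existing in decisions):
--             continue
--         decisions.append(dict(candidate))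
--     return plan
-- ===== SOURCE B (Python) =====
-- REQUIRED_MODEL_GUARDRAIL_DECISIONS = {
--     "collect_agent_result",
--     "review_agent_run",
--     "followup_review",
--     "run_verification",
--     "propose_task",
--     "refine_task",
--     "plan_task",
--     "start_work_session",
--     "dispatch_task",
-- }
--
-- def required_model_guardrail_decision(decision):
--     decision_type = decision.get("type")
--     if decision_type in REQUIRED_MODEL_GUARDRAIL_DECISIONS:
--         return True
--     return decision_type == "self_review" and bool(decision.get("proposed_task_title"))
--
-- def same_ids(candidate, existing):
--     # only called on decisions of the same type; match on the id keys
--     return all(candidate.get(k) == existing.get(k)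
--                for k in ("task_id", "run_id", "plan_id"))
--
-- def append_missing_guardrail_decisions(plan, fallback):
--     decisions = plan.setdefault("decisions", [])
--     by_type = {}
--     for existing in decisions:
--         by_type.setdefault(existing.get("type"), []).append(existing)
--     for candidate in fallback.get("decisions", []):
--         if not required_model_guardrail_decision(candidate):
--             continue
--         bucket = by_type.setdefault(candidate.get("type"), [])
--         if any(same_ids(candidate, existing) for existing in bucket):
--             continue
--         new = dict(candidate)
--         decisions.append(new)
--         bucket.append(new)
--     return plan
-- ===== Notes on version B (the rewrite author's own statement) =====
-- stated objective: alternative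
-- what changed: B groups the existing decisions into a dict of buckets keyed by their 'type' and dedups each candidate only against its own type's bucket with a plain id-key equality check (updating the bucket as it appends), instead of scanning the whole decisions list with the full decision_matches predicate per candidate.
import Mathlib
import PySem

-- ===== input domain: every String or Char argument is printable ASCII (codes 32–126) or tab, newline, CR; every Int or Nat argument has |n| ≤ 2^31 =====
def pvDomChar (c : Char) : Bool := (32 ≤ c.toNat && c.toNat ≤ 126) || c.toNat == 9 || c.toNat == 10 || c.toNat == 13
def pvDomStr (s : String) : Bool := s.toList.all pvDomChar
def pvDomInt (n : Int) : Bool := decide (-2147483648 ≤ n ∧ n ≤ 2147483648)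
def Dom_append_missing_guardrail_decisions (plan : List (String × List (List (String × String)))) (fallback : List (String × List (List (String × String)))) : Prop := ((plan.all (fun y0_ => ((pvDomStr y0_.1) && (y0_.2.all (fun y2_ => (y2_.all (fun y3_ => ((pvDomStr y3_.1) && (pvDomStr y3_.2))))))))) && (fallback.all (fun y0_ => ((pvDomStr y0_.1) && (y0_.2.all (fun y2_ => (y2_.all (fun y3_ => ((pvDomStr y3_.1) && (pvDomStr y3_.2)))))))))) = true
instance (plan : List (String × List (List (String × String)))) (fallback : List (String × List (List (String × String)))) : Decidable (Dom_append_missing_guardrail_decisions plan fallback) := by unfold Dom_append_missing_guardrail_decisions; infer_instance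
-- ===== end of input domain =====

-- B replaces A's per-candidate scan of the whole decisions list with a dict of per-'type'
-- buckets built once and updated as decisions are appended (objective: alternative
-- data structure, same measured cost). Return value only: A mutates `plan` in place;
-- B's Python performs the same mutation, the Lean ports are functional.

-- ===== PORT A =====
-- helpers shared verbatim by both Pythons (identical code in Source A and Source B)
def pvGet (e : List (String × String)) (k : String) : Option String :=
  (PySem.Dict.mk e).get? k

def pvRequiredSet : List String :=
  ["collect_agent_result", "review_agent_run", "followup_review", "run_verification",
   "propose_task", "refine_task", "plan_task", "start_work_session", "dispatch_task"]

def pvRequired (c : List (String × String)) : Bool :=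
  let dt := pvGet c "type"
  if (match dt with | some t => decide (t ∈ pvRequiredSet) | none => false) then true
  else dt == some "self_review" && !((pvGet c "proposed_task_title").getD "" == "")

-- A's key loop in decision_matches, with the `compared` flag and early False return
def pvDMLoop (c e : List (String × String)) : List String → Bool → Bool
  | [], compared => compared || (pvGet c "type" == pvGet e "type")
  | k :: rest, compared =>
    if pvGet c k == none && pvGet e k == none then pvDMLoop c e rest compared
    else if !(pvGet c k == pvGet e k) then false
    else pvDMLoop c e rest true

def pvDecisionMatches (c e : List (String × String)) : Bool :=
  if !(pvGet c "type" == pvGet e "type") then false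
  else pvDMLoop c e ["task_id", "run_id", "plan_id"] false

-- the body of A's `for candidate in fallback.get("decisions", [])` loop
def pvStepA (ds : List (List (String × String))) (c : List (String × String)) :
    List (List (String × String)) :=
  if !pvRequired c then ds
  else if ds.any (fun existing => pvDecisionMatches c existing) then ds
  else ds ++ [c]                                       -- dict(candidate) copies the dict: identity here

def append_missing_guardrail_decisions (plan : List (String × List (List (String × String)))) (fallback : List (String × List (List (String × String)))) : List (String × List (List (String × String))) :=
  let planD := PySem.Dict.mk plan
  let decisions0 := planD.getD "decisions" []          -- plan.setdefault("decisions", []) (its value)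
  let fds := (PySem.Dict.mk fallback).getD "decisions" []
  let decisions := fds.foldl pvStepA decisions0
  ((planD.setdefault "decisions" []).insert "decisions" decisions).items

-- ===== PORT B =====
def pvSameIds (c e : List (String × String)) : Bool :=
  ["task_id", "run_id", "plan_id"].all (fun k => pvGet c k == pvGet e k)

-- the body of B's candidate loop; state = (decisions, by_type)
def pvStepB
    (st : List (List (String × String)) × PySem.Dict (Option String) (List (List (String × String))))
    (c : List (String × String)) :
    List (List (String × String)) × PySem.Dict (Option String) (List (List (String × String))) :=
  if !pvRequired c then st
  else
    let t := pvGet c "type"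
    let bucket := st.2.getD t []
    let bt := st.2.setdefault t []                     -- bucket = by_type.setdefault(t, [])
    if bucket.any (fun existing => pvSameIds c existing) then (st.1, bt)
    else (st.1 ++ [c], bt.modify t [] (· ++ [c]))      -- append to decisions and to its bucket

def append_missing_guardrail_decisions_alt (plan : List (String × List (List (String × String)))) (fallback : List (String × List (List (String × String)))) : List (String × List (List (String × String))) :=
  let planD := PySem.Dict.mk plan
  let decisions0 := planD.getD "decisions" []
  -- by_type.setdefault(existing.get("type"), []).append(existing)
  let byType0 := decisions0.foldl
      (fun bt e => bt.modify (pvGet e "type") [] (· ++ [e]))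
      (PySem.Dict.empty : PySem.Dict (Option String) (List (List (String × String))))
  let fds := (PySem.Dict.mk fallback).getD "decisions" []
  let st := fds.foldl pvStepB (decisions0, byType0)
  ((planD.setdefault "decisions" []).insert "decisions" st.1).items

-- ===== PRECONDITION & SPEC =====
def Spec_append_missing_guardrail_decisions (plan : List (String × List (List (String × String)))) (fallback : List (String × List (List (String × String)))) (out : List (String × List (List (String × String)))) : Prop := out = append_missing_guardrail_decisions_alt plan fallback
instance (plan : List (String × List (List (String × String)))) (fallback : List (String × List (List (String × String)))) (out : List (String × List (List (String × String)))) : Decidable (Spec_append_missing_guardrail_decisions plan fallback out) := by unfold Spec_append_missing_guardrail_decisions; infer_instance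

-- ===== CLAIM (what is proved, stated in full; the proofs are below) =====
def Claim_equal_append_missing_guardrail_decisions : Prop := ∀ (plan : List (String × List (List (String × String)))) (fallback : List (String × List (List (String × String)))), Dom_append_missing_guardrail_decisions plan fallback → Spec_append_missing_guardrail_decisions plan fallback (append_missing_guardrail_decisions plan fallback)

-- ===== LEMMAS AND PROOFS =====

-- When the types agree, A's decision_matches key loop is just key-wise equality.
theorem pvDMLoop_eq_all (c e : List (String × String)) (h : pvGet c "type" = pvGet e "type") :
    ∀ (ks : List String) (b : Bool),
      pvDMLoop c e ks b = ks.all (fun k => pvGet c k == pvGet e k) := by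
  intro ks
  induction ks with
  | nil => intro b; simp [pvDMLoop, h]
  | cons k rest ih =>
    intro b
    simp only [pvDMLoop, List.all_cons]
    cases hc : pvGet c k with
    | none =>
      cases he : pvGet e k with
      | none => simp [ih]
      | some v => simp [hc]
    | some u =>
      cases he : pvGet e k with
      | none => simp
      | some v =>
        by_cases h2 : u = v
        · simp [h2, ih]
        · simp [h2]

theorem pvDecisionMatches_eq (c e : List (String × String)) :
    pvDecisionMatches c e = ((pvGet e "type" == pvGet c "type") && pvSameIds c e) := by
  unfold pvDecisionMatches pvSameIds
  by_cases h : pvGet c "type" = pvGet e "type"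
  · rw [pvDMLoop_eq_all c e h]
    simp [h]
  · simp [h, beq_eq_false_iff_ne.mpr (Ne.symm h)]

-- any over a filter
theorem any_filter_eq {α : Type} (l : List α) (p q : α → Bool) :
    (l.filter p).any q = l.any (fun x => p x && q x) := by
  induction l with
  | nil => rfl
  | cons x xs ih =>
    by_cases h : p x = true
    · simp [h, ih]
    · simp [h, ih]

-- building the bucket map groups the decisions by 'type'
theorem getD_buildBT (l : List (List (String × String)))
    (bt : PySem.Dict (Option String) (List (List (String × String)))) (t : Option String) :
    (l.foldl (fun bt e => bt.modify (pvGet e "type") [] (· ++ [e])) bt).getD t []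
      = bt.getD t [] ++ l.filter (fun e => pvGet e "type" == t) := by
  induction l generalizing bt with
  | nil => simp
  | cons e rest ih =>
    simp only [List.foldl_cons, List.filter_cons, ih, PySem.Dict.getD_modify]
    by_cases h : pvGet e "type" = t
    · simp [h]
    · simp [Ne.symm h, beq_eq_false_iff_ne.mpr h]

-- setdefault never changes a getD lookup with the same default
theorem getD_setdefault (bt : PySem.Dict (Option String) (List (List (String × String))))
    (t t' : Option String) :
    (bt.setdefault t []).getD t' [] = bt.getD t' [] := by
  by_cases h : bt.contains t = true
  · rw [PySem.Dict.setdefault_of_contains bt [] h]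
  · have hf : bt.contains t = false := Bool.eq_false_iff.mpr h
    rw [PySem.Dict.setdefault_of_not_contains bt [] hf, PySem.Dict.getD_insert]
    by_cases h2 : t' = t
    · subst h2
      rw [PySem.Dict.getD_of_not_contains bt [] hf]
      simp
    · simp [h2]

-- the bucket invariant forces B's fold to track A's fold in its first component
theorem loop_eq (l : List (List (String × String)))
    (ds : List (List (String × String)))
    (bt : PySem.Dict (Option String) (List (List (String × String))))
    (hinv : ∀ t, bt.getD t [] = ds.filter (fun e => pvGet e "type" == t)) :
    (l.foldl pvStepB (ds, bt)).1 = l.foldl pvStepA ds := by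
  induction l generalizing ds bt with
  | nil => rfl
  | cons c rest ih =>
    rw [List.foldl_cons, List.foldl_cons]
    by_cases hreq : pvRequired c = true
    · have hany : ((ds, bt).2.getD (pvGet c "type") []).any (fun existing => pvSameIds c existing)
          = ds.any (fun existing => pvDecisionMatches c existing) := by
        show (bt.getD (pvGet c "type") []).any _ = _
        rw [hinv, any_filter_eq]
        exact List.any_congr rfl (fun e => (pvDecisionMatches_eq c e).symm)
      by_cases hm : ds.any (fun existing => pvDecisionMatches c existing) = true
      · have hA : pvStepA ds c = ds := by simp [pvStepA, hreq, hm]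
        have hB : pvStepB (ds, bt) c = (ds, bt.setdefault (pvGet c "type") []) := by
          simp [pvStepB, hreq, hany.trans hm]
        rw [hA, hB]
        exact ih ds _ (fun t => by rw [getD_setdefault]; exact hinv t)
      · have hm' : ds.any (fun existing => pvDecisionMatches c existing) = false :=
          Bool.eq_false_iff.mpr hm
        have hA : pvStepA ds c = ds ++ [c] := by simp [pvStepA, hreq, hm']
        have hB : pvStepB (ds, bt) c
            = (ds ++ [c], (bt.setdefault (pvGet c "type") []).modify (pvGet c "type") [] (· ++ [c])) := by
          simp [pvStepB, hreq, hany.trans hm']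
        rw [hA, hB]
        apply ih
        intro t
        rw [PySem.Dict.getD_modify, getD_setdefault, List.filter_append, hinv]
        by_cases h : t = pvGet c "type"
        · subst h; simp
        · simp [h, getD_setdefault, hinv, beq_eq_false_iff_ne.mpr (Ne.symm h)]
    · have hf : pvRequired c = false := Bool.eq_false_iff.mpr hreq
      have hA : pvStepA ds c = ds := by simp [pvStepA, hf]
      have hB : pvStepB (ds, bt) c = (ds, bt) := by simp [pvStepB, hf]
      rw [hA, hB]
      exact ih ds bt hinv

-- ===== VERDICT (by name: the statement is the Claim_ definition above) =====
theorem append_missing_guardrail_decisions_spec : Claim_equal_append_missing_guardrail_decisions := by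
  intro plan fallback _
  unfold Spec_append_missing_guardrail_decisions
  unfold append_missing_guardrail_decisions append_missing_guardrail_decisions_alt
  simp only
  rw [loop_eq]
  intro t
  rw [getD_buildBT]
  simp
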